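-- pv_equiv track=rewrite | github.com/aMarkSnyder/AdventOfCode2024 | Day07/bridge_repair.py | valid_equation
-- ===== SOURCE A (Python) =====
-- def valid_equation(result, numbers):
--     if len(numbers) == 1:
--         return result == numbers[0]
--     if result < numbers[0]:
--         return False
--     added_numbers = [numbers[0]+numbers[1]] + numbers[2:]
--     multiplied_numbers = [numbers[0]*numbers[1]] + numbers[2:]
--     if valid_equation(result, added_numbers) or valid_equation(result, multiplied_numbers):
--         return True
-- ===== SOURCE B (Python) =====
-- def valid_equation(result, numbers):
--     if len(numbers) == 1:
--         return result == numbers[0]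
--     if result < numbers[0]:
--         return False
--     frontier = {numbers[0]}
--     for n in numbers[1:]:
--         frontier = {w for v in frontier if v <= result for w in (v + n, v * n)}
--     if result in frontier:
--         return True
-- ===== Notes on version B (the rewrite author's own statement) =====
-- stated objective: alternative
-- what changed: Replaces the binary recursion over operator choices by a single left-to-right pass maintaining a deduplicated set of reachable partial values (same <=-result pruning).
import Mathlib
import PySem

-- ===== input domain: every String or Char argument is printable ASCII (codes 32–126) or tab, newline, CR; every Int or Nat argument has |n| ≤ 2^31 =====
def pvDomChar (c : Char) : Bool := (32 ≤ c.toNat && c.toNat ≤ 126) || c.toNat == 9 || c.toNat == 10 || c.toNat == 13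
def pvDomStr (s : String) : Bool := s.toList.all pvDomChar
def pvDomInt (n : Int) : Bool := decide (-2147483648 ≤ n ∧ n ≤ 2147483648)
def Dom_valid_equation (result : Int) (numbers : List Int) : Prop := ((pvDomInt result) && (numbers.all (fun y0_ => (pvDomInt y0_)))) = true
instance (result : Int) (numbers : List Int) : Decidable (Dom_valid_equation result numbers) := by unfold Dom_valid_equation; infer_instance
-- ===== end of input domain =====

-- B replaces A's binary recursion over operator choices by one left-to-right pass maintaining a
-- deduplicated set of reachable partial values (with A's same <=-result pruning): objective
-- 'alternative' (iterative frontier search instead of recursion).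

-- ===== PORT A =====
def valid_equation (result : Int) (numbers : List Int) : Option Bool :=
  match numbers with
  | [] => none  -- Python raises IndexError here; excluded by Pre_
  | [n0] => some (result == n0)
  | n0 :: n1 :: rest =>
    if result < n0 then some false
    else if valid_equation result ((n0 + n1) :: rest) = some true
            ∨ valid_equation result ((n0 * n1) :: rest) = some true then some true
    else none
termination_by numbers.length
decreasing_by all_goals (simp only [List.length_cons]; omega)

-- ===== PORT B =====
-- one loop step of Source B: {w for v in frontier if v <= result for w in (v+n, v*n)}
def pvStep (result : Int) (frontier : PySem.Set Int) (n : Int) : PySem.Set Int :=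
  PySem.Set.ofList ((frontier.filter (fun v => v ≤ result)).flatMap (fun v => [v + n, v * n]))

def valid_equation_alt (result : Int) (numbers : List Int) : Option Bool :=
  match numbers with
  | [] => none  -- Python raises IndexError here; excluded by Pre_
  | n0 :: rest =>
    if rest.length = 0 then some (result == n0)
    else if result < n0 then some false
    else
      let frontier := rest.foldl (pvStep result) (PySem.Set.ofList [n0])
      if PySem.Set.contains frontier result then some true else none

-- ===== PRECONDITION & SPEC =====
-- Pre_ excludes only the empty list, on which both Pythons raise IndexError.
def Pre_valid_equation (result : Int) (numbers : List Int) : Prop := numbers ≠ []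
instance (result : Int) (numbers : List Int) : Decidable (Pre_valid_equation result numbers) := by unfold Pre_valid_equation; infer_instance
def pvWitness_valid_equation : Int × List Int := (10, [2, 3, 4])

def Spec_valid_equation (result : Int) (numbers : List Int) (out : Option Bool) : Prop := out = valid_equation_alt result numbers
instance (result : Int) (numbers : List Int) (out : Option Bool) : Decidable (Spec_valid_equation result numbers out) := by unfold Spec_valid_equation; infer_instance

-- ===== CLAIM (what is proved, stated in full; the proofs are below) =====
def Claim_equal_valid_equation : Prop := ∀ (result : Int) (numbers : List Int), Dom_valid_equation result numbers → Pre_valid_equation result numbers → Spec_valid_equation result numbers (valid_equation result numbers)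

-- ===== LEMMAS AND PROOFS =====

-- A returns `some true` on v :: n :: tl iff v passes the prune and one child succeeds.
lemma valid_equation_true_cons (result v n : Int) (tl : List Int) :
    valid_equation result (v :: n :: tl) = some true ↔
      v ≤ result ∧ (valid_equation result ((v + n) :: tl) = some true
                    ∨ valid_equation result ((v * n) :: tl) = some true) := by
  rw [valid_equation]
  split_ifs with h1 h2 <;> simp_all

-- loop invariant: result ∈ foldl of pvStep over ns from F iff some seed v ∈ F makes A succeed on v :: ns
lemma mem_foldl_pvStep (result : Int) (ns : List Int) :
    ∀ F : List Int, (result ∈ ns.foldl (pvStep result) F ↔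
      ∃ v ∈ F, valid_equation result (v :: ns) = some true) := by
  induction ns with
  | nil =>
    intro F
    simp only [List.foldl_nil, valid_equation]
    constructor
    · intro h; exact ⟨result, h, by simp⟩
    · rintro ⟨v, hv, h⟩; simp at h; rwa [h]
  | cons n tl ih =>
    intro F
    rw [List.foldl_cons, ih]
    constructor
    · rintro ⟨w, hw, hT⟩
      simp only [pvStep, PySem.Set.mem_ofList, List.mem_flatMap, List.mem_filter,
        decide_eq_true_eq, List.mem_cons, List.not_mem_nil, or_false] at hw
      obtain ⟨v, ⟨hvF, hvle⟩, hw⟩ := hw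
      refine ⟨v, hvF, ?_⟩
      rw [valid_equation_true_cons]
      rcases hw with h | h <;> subst h
      · exact ⟨hvle, Or.inl hT⟩
      · exact ⟨hvle, Or.inr hT⟩
    · rintro ⟨v, hvF, hT⟩
      rw [valid_equation_true_cons] at hT
      obtain ⟨hvle, hc⟩ := hT
      rcases hc with h | h
      · exact ⟨v + n, by
          simp only [pvStep, PySem.Set.mem_ofList, List.mem_flatMap, List.mem_filter,
            decide_eq_true_eq]
          exact ⟨v, ⟨hvF, hvle⟩, by simp⟩, h⟩
      · exact ⟨v * n, by
          simp only [pvStep, PySem.Set.mem_ofList, List.mem_flatMap, List.mem_filter,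
            decide_eq_true_eq]
          exact ⟨v, ⟨hvF, hvle⟩, by simp⟩, h⟩

-- ===== VERDICT (by name: the statement is the Claim_ definition above) =====
theorem valid_equation_spec : Claim_equal_valid_equation := by
  intro result numbers _ hpre
  unfold Spec_valid_equation
  match numbers with
  | [] => exact absurd rfl hpre
  | [n0] => rw [valid_equation]; rfl
  | n0 :: n1 :: tl =>
    rw [valid_equation, valid_equation_alt]
    simp only [List.length_cons, Nat.succ_ne_zero, if_false]
    by_cases h0 : result < n0
    · simp [h0]
    · simp only [h0, if_false]
      have hmem := mem_foldl_pvStep result (n1 :: tl) (PySem.Set.ofList [n0])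
      have hone : ∀ v, v ∈ PySem.Set.ofList [n0] ↔ v = n0 := by
        intro v; rw [PySem.Set.mem_ofList]; simp
      by_cases hc : valid_equation result ((n0 + n1) :: tl) = some true
          ∨ valid_equation result ((n0 * n1) :: tl) = some true
      · have : result ∈ (n1 :: tl).foldl (pvStep result) (PySem.Set.ofList [n0]) := by
          rw [hmem]
          exact ⟨n0, (hone n0).mpr rfl, by rw [valid_equation_true_cons]; exact ⟨by omega, hc⟩⟩
        rw [List.foldl_cons] at this
        simp [hc, this]
      · have : result ∉ (n1 :: tl).foldl (pvStep result) (PySem.Set.ofList [n0]) := by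
          rw [hmem]
          rintro ⟨v, hv, hT⟩
          rw [hone] at hv; subst hv
          rw [valid_equation_true_cons] at hT
          exact hc hT.2
        rw [List.foldl_cons] at this
        simp [hc, this]
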